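-- pv_equiv track=rewrite | github.com/dushenda/LeetCode | DIDI/didi1.py | foo
-- ===== SOURCE A (Python) =====
-- def foo(n):
--     res1 = 0
--     res2 = []
--     for a in range(1, 10):
--         for b in range(10):
--             for c in range(10):
--                 if a != b and a != c and b != c:
--                     v1 = a * 100 + b * 10 + c
--                     v2 = a * 100 + c * 10 + c
--                     if v1 + v2 == n:
--                         res1 += 1
--                         res2.append([v1, v2])
--     return res1, sorted(res2, key=lambda s: s[0])
-- ===== SOURCE B (Python) =====
-- def foo(n):
--     res = []
--     for a in range(1, 10):
--         for b in range(10):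
--             rem = n - 200 * a - 10 * b
--             if rem >= 0 and rem % 12 == 0:
--                 c = rem // 12
--                 if c <= 9 and a != b and a != c and b != c:
--                     res.append([a * 100 + b * 10 + c, a * 100 + c * 11])
--     return len(res), sorted(res, key=lambda s: s[0])
-- ===== Notes on version B (the rewrite author's own statement) =====
-- stated objective: faster
-- what changed: B drops A's innermost brute-force loop over c: for each (a,b) it solves 200a+10b+12c=n for c in closed form (divisibility and range checks), appending the single candidate triple; the append order is unchanged, so the final sort is over the same list.
import Mathlib
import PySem

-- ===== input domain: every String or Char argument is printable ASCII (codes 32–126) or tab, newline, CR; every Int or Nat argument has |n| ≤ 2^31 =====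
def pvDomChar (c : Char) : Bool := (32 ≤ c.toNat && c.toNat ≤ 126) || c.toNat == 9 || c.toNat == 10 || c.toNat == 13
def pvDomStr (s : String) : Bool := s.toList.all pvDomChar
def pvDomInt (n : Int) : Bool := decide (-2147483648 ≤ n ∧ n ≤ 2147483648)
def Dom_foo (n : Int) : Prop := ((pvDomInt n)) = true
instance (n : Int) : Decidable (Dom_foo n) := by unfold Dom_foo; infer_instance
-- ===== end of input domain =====

-- B replaces A's innermost loop over c by solving 200a+10b+12c = n for c in closed form (faster by a constant factor: 90 pairs instead of 900 triples).

-- ===== PORT A =====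
-- innermost body: the two nested ifs of A over digit c
def fooC (n a b : Int) (s : Int × List (List Int)) (c : Int) : Int × List (List Int) :=
  if a ≠ b ∧ a ≠ c ∧ b ≠ c then
    if (a * 100 + b * 10 + c) + (a * 100 + c * 10 + c) = n then
      (s.1 + 1, s.2 ++ [[a * 100 + b * 10 + c, a * 100 + c * 10 + c]])
    else s
  else s

def fooB (n a : Int) (s : Int × List (List Int)) (b : Int) : Int × List (List Int) :=
  (PySem.List.pyRange 0 10).foldl (fooC n a b) s

def fooA (n : Int) (s : Int × List (List Int)) (a : Int) : Int × List (List Int) :=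
  (PySem.List.pyRange 0 10).foldl (fooB n a) s

def foo (n : Int) : Int × List (List Int) :=
  let st := (PySem.List.pyRange 1 10).foldl (fooA n) ((0 : Int), ([] : List (List Int)))
  (st.1, PySem.List.sorted st.2 (fun s => PySem.List.pyGetD s 0 0) false)

-- ===== PORT B =====
-- per-(a,b) step of B: solve rem = n - 200a - 10b = 12c for the single candidate c
def fooAltB (n a : Int) (r : List (List Int)) (b : Int) : List (List Int) :=
  if 0 ≤ n - 200 * a - 10 * b ∧ PySem.Int.mod (n - 200 * a - 10 * b) 12 = 0 then
    if PySem.Int.floordiv (n - 200 * a - 10 * b) 12 ≤ 9 ∧ a ≠ b ∧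
        a ≠ PySem.Int.floordiv (n - 200 * a - 10 * b) 12 ∧
        b ≠ PySem.Int.floordiv (n - 200 * a - 10 * b) 12 then
      r ++ [[a * 100 + b * 10 + PySem.Int.floordiv (n - 200 * a - 10 * b) 12,
             a * 100 + PySem.Int.floordiv (n - 200 * a - 10 * b) 12 * 11]]
    else r
  else r

def fooAltA (n : Int) (r : List (List Int)) (a : Int) : List (List Int) :=
  (PySem.List.pyRange 0 10).foldl (fooAltB n a) r

def foo_alt (n : Int) : Int × List (List Int) :=
  let res := (PySem.List.pyRange 1 10).foldl (fooAltA n) ([] : List (List Int))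
  ((res.length : Int), PySem.List.sorted res (fun s => PySem.List.pyGetD s 0 0) false)

-- ===== PRECONDITION & SPEC =====
def Spec_foo (n : Int) (out : Int × List (List Int)) : Prop := out = foo_alt n
instance (n : Int) (out : Int × List (List Int)) : Decidable (Spec_foo n out) := by unfold Spec_foo; infer_instance

-- ===== CLAIM (what is proved, stated in full; the proofs are below) =====
def Claim_equal_foo : Prop := ∀ (n : Int), Dom_foo n → Spec_foo n (foo n)

-- ===== LEMMAS AND PROOFS =====

-- A's inner c-loop, started at c = 10 - k, appends the unique solution of 200a+10b+12c = n if it lies in [10-k, 9]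
lemma innerA (n a b : Int) : ∀ (k : Nat), k ≤ 10 → ∀ (s : Int × List (List Int)),
    (PySem.List.pyRange (10 - (k : Int)) 10).foldl (fooC n a b) s =
    if 0 ≤ n - 200 * a - 10 * b ∧ (n - 200 * a - 10 * b) % 12 = 0 ∧
        10 - (k : Int) ≤ (n - 200 * a - 10 * b) / 12 ∧ (n - 200 * a - 10 * b) / 12 ≤ 9 ∧
        a ≠ b ∧ a ≠ (n - 200 * a - 10 * b) / 12 ∧ b ≠ (n - 200 * a - 10 * b) / 12 then
      (s.1 + 1, s.2 ++ [[a * 100 + b * 10 + (n - 200 * a - 10 * b) / 12,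
                         a * 100 + ((n - 200 * a - 10 * b) / 12) * 10 + (n - 200 * a - 10 * b) / 12]])
    else s := by
  intro k
  induction k with
  | zero =>
      intro _ s
      have h0 : ((10 : Int) - ((0 : Nat) : Int)) = 10 := by norm_num
      rw [h0, show PySem.List.pyRange (10 : Int) 10 = [] from by decide, List.foldl_nil, if_neg]
      omega
  | succ k ih =>
      intro hk s
      have hlt : (10 : Int) - ((k + 1 : Nat) : Int) < 10 := by push_cast; omega
      rw [PySem.List.pyRange_one_cons hlt, List.foldl_cons]
      have hstep : (10 : Int) - ((k + 1 : Nat) : Int) + 1 = 10 - (k : Int) := by push_cast; ring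
      rw [hstep]
      set c0 : Int := 10 - ((k + 1 : Nat) : Int) with hc0
      have hc0b : c0 = 10 - ((k : Int) + 1) := by rw [hc0]; push_cast; ring
      by_cases hd : a ≠ b ∧ a ≠ c0 ∧ b ≠ c0
      · by_cases he : (a * 100 + b * 10 + c0) + (a * 100 + c0 * 10 + c0) = n
        · have hbody : fooC n a b s c0 = (s.1 + 1, s.2 ++ [[a * 100 + b * 10 + c0, a * 100 + c0 * 10 + c0]]) := by
            rw [fooC, if_pos hd, if_pos he]
          rw [hbody, ih (by omega)]
          have hc : (n - 200 * a - 10 * b) / 12 = c0 := by omega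
          rw [if_neg (by omega), if_pos (by refine ⟨by omega, by omega, by omega, by omega, hd.1, ?_, ?_⟩ <;> rw [hc] <;> tauto)]
          rw [hc]
        · have hbody : fooC n a b s c0 = s := by rw [fooC, if_pos hd, if_neg he]
          rw [hbody, ih (by omega)]
          exact if_congr (by omega) rfl rfl
      · have hbody : fooC n a b s c0 = s := by rw [fooC, if_neg hd]
        rw [hbody, ih (by omega)]
        exact if_congr (by omega) rfl rfl

-- per-(a,b): A's inner loop from (x, l) is B's step paired with its length change
lemma step_eq (n a : Int) : ∀ (x : Int) (l : List (List Int)) (b : Int),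
    fooB n a (x, l) b = (x + ((fooAltB n a l b).length : Int) - (l.length : Int), fooAltB n a l b) := by
  intro x l b
  rw [fooB, show (0 : Int) = 10 - ((10 : Nat) : Int) from by norm_num,
      innerA n a b 10 (by omega) (x, l),
      show ((10 : Int) - ((10 : Nat) : Int)) = 0 from by norm_num]
  rw [fooAltB]
  simp only [PySem.Int.floordiv_eq_ediv_of_pos (show (0:Int) < 12 by norm_num),
             PySem.Int.mod_eq_emod_of_pos (show (0:Int) < 12 by norm_num),
             show ∀ c : Int, a * 100 + c * 10 + c = a * 100 + c * 11 from fun c => by ring]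
  split_ifs with h1 h2 h3 h4 h5
  · refine Prod.ext ?_ rfl
    simp only [List.length_append, List.length_cons, List.length_nil]
    push_cast; ring
  · exfalso; omega
  · exfalso; omega
  · exfalso; omega
  · refine Prod.ext ?_ rfl; simp
  · refine Prod.ext ?_ rfl; simp

-- a fold threading (count, list) equals the list-only fold paired with its length change
lemma pair_fold {α : Type} (fA : (Int × List α) → Int → (Int × List α)) (fB : List α → Int → List α)
    (h : ∀ (x : Int) (l : List α) (i : Int),
      fA (x, l) i = (x + ((fB l i).length : Int) - (l.length : Int), fB l i)) :
    ∀ (L : List Int) (x : Int) (l : List α),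
      L.foldl fA (x, l) = (x + (((L.foldl fB l).length : Int)) - (l.length : Int), L.foldl fB l) := by
  intro L
  induction L with
  | nil => intro x l; simp
  | cons i L ihl =>
      intro x l
      rw [List.foldl_cons, List.foldl_cons, h, ihl]
      refine Prod.ext ?_ rfl
      push_cast; ring

lemma fooA_pair (n : Int) : ∀ (x : Int) (l : List (List Int)) (a : Int),
    fooA n (x, l) a = (x + ((fooAltA n l a).length : Int) - (l.length : Int), fooAltA n l a) := by
  intro x l a
  rw [fooA, fooAltA]
  exact pair_fold (fooB n a) (fooAltB n a) (step_eq n a) _ x l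

-- ===== VERDICT (by name: the statement is the Claim_ definition above) =====
theorem foo_spec : Claim_equal_foo := by
  intro n _
  unfold Spec_foo foo foo_alt
  rw [pair_fold (fooA n) (fooAltA n) (fooA_pair n) _ 0 []]
  simp
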